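-- pv_equiv track=rewrite | github.com/shuo502/toolsscript | dwhois.py | keylist
-- ===== SOURCE A (Python) =====
-- def keylist(key):
--     keydic=[]
--     for j in key:
--         keydic.append(j)
--         for k in key:
--             keydic.append(j+""+k)
--             for m in key:
--                 keydic.append(j+""+k+""+m)
--                 for n in key:
--                     keydic.append(j+""+k+""+m+""+n)
--     return keydic
-- ===== SOURCE B (Python) =====
-- def keylist(key):
--     keydic = []
--
--     def rec(prefix, remaining):
--         for c in key:
--             p = prefix + c
--             keydic.append(p)
--             if remaining > 1:
--                 rec(p, remaining - 1)
--
--     rec('', 4)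
--     return keydic
-- ===== Notes on version B (the rewrite author's own statement) =====
-- stated objective: simpler
-- what changed: Replaces the four hardcoded nested loops with one recursive helper rec(prefix, remaining) that emits each prefix as it is formed and recurses up to depth 4, preserving A's exact preorder.
import Mathlib
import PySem

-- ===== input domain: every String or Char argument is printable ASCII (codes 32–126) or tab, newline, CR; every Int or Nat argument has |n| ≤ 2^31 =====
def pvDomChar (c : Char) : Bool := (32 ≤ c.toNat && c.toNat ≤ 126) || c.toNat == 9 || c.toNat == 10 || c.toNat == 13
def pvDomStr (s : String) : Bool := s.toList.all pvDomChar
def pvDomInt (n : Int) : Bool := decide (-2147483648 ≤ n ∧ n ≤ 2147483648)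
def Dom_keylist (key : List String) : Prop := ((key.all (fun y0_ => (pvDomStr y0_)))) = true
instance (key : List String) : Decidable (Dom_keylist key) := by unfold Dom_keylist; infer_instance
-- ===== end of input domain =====

-- B replaces A's four hardcoded nested loops by one recursive depth-bounded generator (same preorder, same cost); objective: simpler.


-- ===== PORT A =====
def keylist (key : List String) : List String :=
  key.foldl (fun acc j =>
    key.foldl (fun acc2 k =>
      key.foldl (fun acc3 m =>
        key.foldl (fun acc4 n => acc4 ++ [j ++ k ++ m ++ n])
          (acc3 ++ [j ++ k ++ m]))
        (acc2 ++ [j ++ k]))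
      (acc ++ [j])) []

-- ===== PORT B =====
-- rec(prefix, remaining): for c in key: p = prefix+c; append p; if remaining > 1: rec(p, remaining-1)
-- (remaining is counted down structurally: at remaining = 0 nothing is done, matching the 'remaining > 1' guard)
def keylistRec (key : List String) : Nat → String → List String → List String
  | 0, _, acc => acc
  | r + 1, pre, acc =>
      key.foldl (fun acc c => keylistRec key r (pre ++ c) (acc ++ [pre ++ c])) acc

def keylist_alt (key : List String) : List String :=
  keylistRec key 4 "" []

-- ===== PRECONDITION & SPEC =====
def Spec_keylist (key : List String) (out : List String) : Prop := out = keylist_alt key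
instance (key : List String) (out : List String) : Decidable (Spec_keylist key out) := by unfold Spec_keylist; infer_instance

-- ===== CLAIM (what is proved, stated in full; the proofs are below) =====
def Claim_equal_keylist : Prop := ∀ (key : List String), Dom_keylist key → Spec_keylist key (keylist key)

-- ===== LEMMAS AND PROOFS =====

-- pure generator: all strings of length 1..r of prefixes extended over key, in preorder
def genKeys (key : List String) : Nat → String → List String
  | 0, _ => []
  | r + 1, pre => key.flatMap (fun c => (pre ++ c) :: genKeys key r (pre ++ c))

theorem keylistRec_eq_genKeys (key : List String) :
    ∀ (r : Nat) (pre : String) (acc : List String),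
      keylistRec key r pre acc = acc ++ genKeys key r pre := by
  intro r
  induction r with
  | zero => intro pre acc; simp [keylistRec, genKeys]
  | succ r ih =>
      intro pre acc
      simp only [keylistRec, ih, List.append_assoc, List.singleton_append]
      rw [PySem.List.foldl_append_eq_flatMap]
      simp [genKeys]

theorem keylist_eq_genKeys (key : List String) : keylist key = genKeys key 4 "" := by
  simp only [keylist, PySem.List.foldl_append_eq_flatMap, List.append_assoc]
  simp [genKeys, String.append_assoc]

-- ===== VERDICT (by name: the statement is the Claim_ definition above) =====
theorem keylist_spec : Claim_equal_keylist := by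
  intro key _
  unfold Spec_keylist keylist_alt
  rw [keylist_eq_genKeys, keylistRec_eq_genKeys]
  simp
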